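-- pv_equiv track=rewrite | github.com/dhermes/google-cloud-pubsub-performance | thread_names.py | get_names_remap
-- ===== SOURCE A (Python) =====
-- import collections
--
-- def get_names_remap(thread_names):
--     """Do a remapping, where e.g. 'foobar+++' becomes 'foobar3'
--
--     .. note::
--
--         This assumes ``THREAD_NAMES`` is "final" so we don't need to
--         lock before access.
--     """
--     prefixes = collections.Counter()
--     for name in thread_names:
--         stripped = name.rstrip('+')
--         prefixes[stripped] += 1
--
--     names_map = {'MainThread': 'MainThread'}
--     for name in thread_names:
--         stripped = name.rstrip('+')
--         if prefixes[stripped] > 1: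
--             count = len(name) - len(stripped)
--             to_add = '{}{}'.format(stripped, count)
--         else:
--             assert stripped == name
--             to_add = name
--
--         if to_add.startswith('Thread-'):
--             to_add = to_add[len('Thread-'):]
--         names_map[name] = to_add
--
--     return names_map
-- ===== SOURCE B (Python) =====
-- def get_names_remap(thread_names):
--     """Do a remapping, where e.g. 'foobar+++' becomes 'foobar3'"""
--     strippeds = sorted(name.rstrip('+') for name in thread_names)
--     # a prefix is ambiguous iff it occurs at least twice, i.e. at adjacent
--     # positions of the sorted list
--     ambiguous = {a for a, b in zip(strippeds, strippeds[1:]) if a == b}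
--
--     def remap(name):
--         stripped = name.rstrip('+')
--         if stripped in ambiguous:
--             new_name = stripped + str(len(name) - len(stripped))
--         else:
--             assert name == stripped
--             new_name = name
--         if new_name.startswith('Thread-'):
--             new_name = new_name[len('Thread-'):]
--         return new_name
--
--     return {'MainThread': 'MainThread', **{name: remap(name) for name in thread_names}}
-- ===== Notes on version B (the rewrite author's own statement) =====
-- stated objective: alternative
-- what changed: B finds the ambiguous stripped prefixes by sorting them and collecting adjacent equal pairs into a set (instead of a Counter), computes each new name with a pure remap helper, and builds the result as a dict comprehension merged over the seeded MainThread entry instead of mutating a dict in a second loop.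
import Mathlib
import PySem

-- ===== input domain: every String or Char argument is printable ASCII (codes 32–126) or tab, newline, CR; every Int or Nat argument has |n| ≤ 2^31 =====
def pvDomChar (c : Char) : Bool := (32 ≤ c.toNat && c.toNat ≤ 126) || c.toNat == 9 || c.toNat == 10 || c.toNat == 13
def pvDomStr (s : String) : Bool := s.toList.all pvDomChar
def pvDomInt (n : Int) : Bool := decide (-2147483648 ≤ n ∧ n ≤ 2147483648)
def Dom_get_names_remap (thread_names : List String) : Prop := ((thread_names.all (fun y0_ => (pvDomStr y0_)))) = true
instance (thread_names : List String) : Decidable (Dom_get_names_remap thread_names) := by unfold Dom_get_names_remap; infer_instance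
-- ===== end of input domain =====

-- B replaces A's Counter pass by sort-then-adjacent-scan duplicate detection and the
-- mutating second loop by a dict comprehension merged over the seeded MainThread entry
-- (alternative decomposition, no speed claim).

-- shared helper: name.rstrip('+') (hand port, exact: drops the maximal trailing run of '+')
def stripPlus (s : String) : String := String.ofList ((s.toList.reverse.dropWhile (fun c => c == '+')).reverse)

-- ===== PORT A =====
def get_names_remap (thread_names : List String) : List (String × String) :=
  let prefixes : PySem.Dict String Int :=
    thread_names.foldl (fun d name => d.modify (stripPlus name) 0 (· + 1)) PySem.Dict.empty
  let names_map : PySem.Dict String String :=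
    thread_names.foldl (fun m name =>
      let stripped := stripPlus name
      let to_add :=
        if prefixes.getD stripped 0 > 1 then
          stripped ++ PySem.Int.toStr ((PySem.Str.len name : Int) - (PySem.Str.len stripped : Int))
        else
          name  -- `assert stripped == name` raises exactly when stripped ≠ name: excluded by Pre_
      let to_add := if PySem.Str.startswith to_add "Thread-" then PySem.Str.slice to_add (some 7) none else to_add
      m.insert name to_add)
      ((PySem.Dict.empty : PySem.Dict String String).insert "MainThread" "MainThread")
  names_map.items

-- ===== PORT B =====
def remapB (ambiguous : PySem.Set String) (name : String) : String :=
  let stripped := stripPlus name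
  let new_name :=
    if PySem.Set.contains ambiguous stripped then
      stripped ++ PySem.Int.toStr ((PySem.Str.len name : Int) - (PySem.Str.len stripped : Int))
    else
      name  -- `assert name == stripped` raises exactly when stripped ≠ name: excluded by Pre_
  if PySem.Str.startswith new_name "Thread-" then PySem.Str.slice new_name (some 7) none else new_name

def get_names_remap_alt (thread_names : List String) : List (String × String) :=
  let strippeds := PySem.List.sorted (thread_names.map stripPlus) (fun x => x) false
  let ambiguous : PySem.Set String :=
    PySem.Set.ofList (((strippeds.zip (strippeds.drop 1)).filter (fun p => p.1 == p.2)).map Prod.fst)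
  let inner : PySem.Dict String String :=
    thread_names.foldl (fun d name => d.insert name (remapB ambiguous name)) PySem.Dict.empty
  -- {'MainThread': 'MainThread', **inner}
  (inner.items.foldl (fun d p => d.insert p.1 p.2)
    ((PySem.Dict.empty : PySem.Dict String String).insert "MainThread" "MainThread")).items

-- ===== PRECONDITION & SPEC =====
-- Pre_ excludes exactly the inputs on which A (and B alike) raises AssertionError:
-- a name with trailing '+' whose stripped prefix occurs only once.
def Pre_get_names_remap (thread_names : List String) : Prop :=
  ∀ name ∈ thread_names,
    (thread_names.map stripPlus).count (stripPlus name) = 1 → stripPlus name = name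

instance (thread_names : List String) : Decidable (Pre_get_names_remap thread_names) := by
  unfold Pre_get_names_remap; infer_instance

def pvWitness_get_names_remap : List String := ["Thread-7+", "Thread-7++", "worker"]

def Spec_get_names_remap (thread_names : List String) (out : List (String × String)) : Prop :=
  out = get_names_remap_alt thread_names
instance (thread_names : List String) (out : List (String × String)) : Decidable (Spec_get_names_remap thread_names out) := by unfold Spec_get_names_remap; infer_instance

-- ===== CLAIM (what is proved, stated in full; the proofs are below) =====
def Claim_equal_get_names_remap : Prop := ∀ (thread_names : List String), Dom_get_names_remap thread_names → Pre_get_names_remap thread_names → Spec_get_names_remap thread_names (get_names_remap thread_names)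

-- ===== LEMMAS AND PROOFS =====


-- a fold of inserts with a pointwise value function: lookups
theorem pv_get?_fold_of_not_mem (f : String → String) (l : List String)
    (d : PySem.Dict String String) (n : String) (hn : n ∉ l) :
    (l.foldl (fun d m => d.insert m (f m)) d).get? n = d.get? n := by
  induction l generalizing d with
  | nil => rfl
  | cons a t ih =>
    simp only [List.mem_cons, not_or] at hn
    simp only [List.foldl_cons]
    rw [ih _ hn.2, PySem.Dict.get?_insert_of_ne _ _ (Ne.symm ?_)]
    exact fun h => hn.1 h.symm

theorem pv_get?_fold_of_mem (f : String → String) (l : List String)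
    (d : PySem.Dict String String) (n : String) (hn : n ∈ l) :
    (l.foldl (fun d m => d.insert m (f m)) d).get? n = some (f n) := by
  induction l generalizing d with
  | nil => cases hn
  | cons a t ih =>
    simp only [List.foldl_cons]
    by_cases ht : n ∈ t
    · exact ih _ ht
    · have hna : n = a := by rcases List.mem_cons.mp hn with h | h; exact h; exact absurd h ht
      rw [pv_get?_fold_of_not_mem _ _ _ _ ht, hna, PySem.Dict.get?_insert_self]

theorem pv_items_val (f : String → String) (l : List String) :
    ∀ p ∈ (l.foldl (fun d m => d.insert m (f m)) (PySem.Dict.empty : PySem.Dict String String)).items,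
      p.2 = f p.1 := by
  induction l using List.reverseRecOn with
  | nil => intro p hp; simp [PySem.Dict.empty] at hp
  | append_singleton t n ih =>
    intro p hp
    rw [List.foldl_append, List.foldl_cons, List.foldl_nil] at hp
    rcases (PySem.Dict.mem_items_insert _ _ _ _).mp hp with h | h
    · subst h; rfl
    · exact ih p h.1

theorem pv_insert_noop (d : PySem.Dict String String) (k v : String)
    (hnd : d.keys.Nodup) (h : d.get? k = some v) : d.insert k v = d := by
  apply PySem.Dict.ext
  have hc : d.contains k = true := by rw [PySem.Dict.contains_eq_isSome_get?, h]; rfl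
  rw [PySem.Dict.items_insert_of_contains _ _ hc]
  rw [show d.items = List.map id d.items from (List.map_id _).symm]
  rw [List.map_map]
  apply List.map_congr_left
  intro p hp
  show (if (p.1 == k) = true then (k, v) else p) = id p
  by_cases hk : (p.1 == k) = true
  · have hk' : p.1 = k := eq_of_beq hk
    have h2 := PySem.Dict.get?_of_mem_items (d := d) (k := p.1) (v := p.2) (by simpa using hp) hnd
    rw [hk'] at h2; rw [h2] at h
    have hv : p.2 = v := Option.some.inj h
    simp only [hk, if_pos, id]
    rw [← hv, ← hk']
  · simp [hk]

theorem pv_fold_items_fold (f : String → String) (l : List String)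
    (seed : PySem.Dict String String) (hs : seed.keys.Nodup) :
    ((l.foldl (fun d m => d.insert m (f m)) (PySem.Dict.empty : PySem.Dict String String)).items).foldl
        (fun d p => d.insert p.1 p.2) seed
      = l.foldl (fun d m => d.insert m (f m)) seed := by
  induction l using List.reverseRecOn with
  | nil => rfl
  | append_singleton t n ih =>
    simp only [List.foldl_append, List.foldl_cons, List.foldl_nil]
    by_cases hc : (t.foldl (fun d m => d.insert m (f m)) (PySem.Dict.empty : PySem.Dict String String)).contains n
    · -- n already a key: the insert rewrites items in place with the same value
      have hmem : n ∈ t := by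
        by_contra hnm
        rw [PySem.Dict.contains_eq_isSome_get?, pv_get?_fold_of_not_mem _ _ _ _ hnm] at hc
        simp [PySem.Dict.get?_empty] at hc
      rw [PySem.Dict.items_insert_of_contains _ _ hc]
      have hmap : ((t.foldl (fun d m => d.insert m (f m)) (PySem.Dict.empty : PySem.Dict String String)).items.map
          (fun p => if p.1 == n then (n, f n) else p))
          = (t.foldl (fun d m => d.insert m (f m)) (PySem.Dict.empty : PySem.Dict String String)).items := by
        conv_rhs => rw [show (t.foldl (fun d m => d.insert m (f m)) (PySem.Dict.empty : PySem.Dict String String)).items = List.map id (t.foldl (fun d m => d.insert m (f m)) (PySem.Dict.empty : PySem.Dict String String)).items from (List.map_id _).symm]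
        apply List.map_congr_left
        intro p hp
        show (if (p.1 == n) = true then (n, f n) else p) = id p
        by_cases hk : (p.1 == n) = true
        · have h1 : p.1 = n := eq_of_beq hk
          have h2 := pv_items_val f t p hp
          simp only [hk, if_pos, id]
          rw [← h1, ← h2]
        · simp [hk]
      rw [hmap, ih]
      refine (pv_insert_noop _ _ _ ?_ ?_).symm
      · exact PySem.Dict.nodup_keys_foldl_insert t (fun _ m => f m) seed hs
      · exact pv_get?_fold_of_mem f t seed n hmem
    · rw [PySem.Dict.items_insert_of_not_contains _ _ (by simpa using hc), List.foldl_append]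
      simp only [List.foldl_cons, List.foldl_nil, ih]


-- in a ≤-sorted list, an element occurs at least twice iff it occurs at two adjacent positions
theorem pv_adj_iff (x : String) : ∀ (s : List String), s.Pairwise (· ≤ ·) →
    ((x ∈ ((s.zip (s.drop 1)).filter (fun p => p.1 == p.2)).map Prod.fst) ↔ 2 ≤ s.count x) := by
  intro s
  induction s with
  | nil => intro _; simp
  | cons a t ih =>
    intro h
    have ha : ∀ y ∈ t, a ≤ y := (List.pairwise_cons.mp h).1
    have ht : t.Pairwise (· ≤ ·) := (List.pairwise_cons.mp h).2
    cases t with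
    | nil =>
      simp [List.count_cons]
      split <;> omega
    | cons b t' =>
      have key := ih ht
      simp only [List.drop_succ_cons, List.drop_zero] at key
      have hb : ∀ y ∈ t', b ≤ y := (List.pairwise_cons.mp ht).1
      have hcnt : (a :: b :: t').count x = (b :: t').count x + (if x = a then 1 else 0) := by
        rw [List.count_cons]
        simp only [beq_iff_eq, @eq_comm String a x]
      simp only [List.drop_succ_cons, List.drop_zero, List.zip_cons_cons, List.filter_cons]
      by_cases hab : a = b
      · have habb : (a == b) = true := beq_iff_eq.mpr hab
        rw [if_pos habb]
        rw [List.map_cons, List.mem_cons]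
        constructor
        · rintro (hxa | hxL)
          · subst hxa; simp [hab.symm]
          · have := key.mp hxL; omega
        · intro hc
          by_cases hxa : x = a
          · exact Or.inl hxa
          · rw [hcnt, if_neg hxa] at hc
            exact Or.inr (key.mpr (by omega))
      · rw [if_neg (by simpa using hab)]
        constructor
        · intro hxL
          have := key.mp hxL; omega
        · intro hc
          by_cases hxa : x = a
          · -- x = a occurs again in b :: t': by sortedness that repeat must be b, contradicting a ≠ b
            subst hxa
            rw [hcnt, if_pos rfl] at hc
            have hxmem : x ∈ b :: t' := List.count_pos_iff.mp (by omega)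
            rcases List.mem_cons.mp hxmem with hxb | hxt
            · exact absurd hxb hab
            · have h2 : b ≤ x := hb x hxt
              have h3 : x ≤ b := ha b (List.mem_cons_self)
              exact absurd (le_antisymm h3 h2) hab
          · rw [hcnt, if_neg hxa] at hc
            exact key.mpr (by omega)

theorem pv_contains_iff (tn : List String) (y : String) :
    (PySem.Set.contains (PySem.Set.ofList
        ((((PySem.List.sorted (tn.map stripPlus) (fun x => x) false).zip
            ((PySem.List.sorted (tn.map stripPlus) (fun x => x) false).drop 1)).filter
          (fun p => p.1 == p.2)).map Prod.fst)) y = true)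
      ↔ 2 ≤ (tn.map stripPlus).count y := by
  have hmem : ∀ (s : PySem.Set String), (PySem.Set.contains s y = true) ↔ y ∈ s := by
    intro s; simp [PySem.Set.contains]
  rw [hmem, PySem.Set.mem_ofList]
  rw [pv_adj_iff y _ (PySem.List.sorted_pairwise (tn.map stripPlus) (fun x => x))]
  rw [(PySem.List.sorted_perm (tn.map stripPlus) (fun x => x) false).count_eq]

theorem pv_foldl_map {α β γ : Type} (g : α → β) (f : γ → β → γ) (l : List α) (init : γ) :
    List.foldl (fun d x => f d (g x)) init l = List.foldl f init (l.map g) := by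
  induction l generalizing init with
  | nil => rfl
  | cons a t ih => simp only [List.foldl_cons, List.map_cons]; exact ih _

theorem pv_getD_count (tn : List String) (y : String) :
    (tn.foldl (fun d name => d.modify (stripPlus name) 0 (· + 1))
        (PySem.Dict.empty : PySem.Dict String Int)).getD y 0
      = ((tn.map stripPlus).count y : Int) := by
  rw [show (List.foldl (fun (d : PySem.Dict String Int) name => d.modify (stripPlus name) 0 (· + 1)) PySem.Dict.empty tn)
        = List.foldl (fun (d : PySem.Dict String Int) x => d.modify x 0 (· + 1)) PySem.Dict.empty (tn.map stripPlus)
      from pv_foldl_map stripPlus (fun (d : PySem.Dict String Int) x => d.modify x 0 (· + 1)) tn PySem.Dict.empty]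
  rw [PySem.Dict.getD_foldl_modify_add_one]
  simp [PySem.Dict.getD_empty]

-- per-name value: A's Counter test agrees with B's ambiguous-set test
theorem pv_val (tn : List String) (name : String) :
    (if (List.foldl (fun (d : PySem.Dict String Int) name => d.modify (stripPlus name) 0 (· + 1))
          PySem.Dict.empty tn).getD (stripPlus name) 0 > 1 then
        stripPlus name ++ PySem.Int.toStr ((PySem.Str.len name : Int) - (PySem.Str.len (stripPlus name) : Int))
      else name)
    = (if PySem.Set.contains (PySem.Set.ofList
          ((((PySem.List.sorted (tn.map stripPlus) (fun x => x) false).zip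
              ((PySem.List.sorted (tn.map stripPlus) (fun x => x) false).drop 1)).filter
            (fun p => p.1 == p.2)).map Prod.fst)) (stripPlus name) = true then
        stripPlus name ++ PySem.Int.toStr ((PySem.Str.len name : Int) - (PySem.Str.len (stripPlus name) : Int))
      else name) := by
  by_cases hc : 2 ≤ (tn.map stripPlus).count (stripPlus name)
  · rw [if_pos (by rw [pv_getD_count]; omega), if_pos ((pv_contains_iff tn (stripPlus name)).mpr hc)]
  · rw [if_neg (by rw [pv_getD_count]; omega), if_neg (by
      intro h; exact hc ((pv_contains_iff tn (stripPlus name)).mp h))]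

set_option maxHeartbeats 1000000 in
theorem pv_main (tn : List String) : get_names_remap tn = get_names_remap_alt tn := by
  unfold get_names_remap get_names_remap_alt
  dsimp only
  rw [pv_fold_items_fold _ tn _
    (PySem.Dict.nodup_keys_insert _ _ _ PySem.Dict.nodup_keys_empty)]
  congr 1
  apply List.foldl_ext
  intro m name _
  unfold remapB
  dsimp only
  rw [pv_val tn name]

theorem get_names_remap_spec : Claim_equal_get_names_remap := by
  intro tn _ _
  unfold Spec_get_names_remap
  exact pv_main tn
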